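-- pv_equiv track=rewrite | github.com/israelbolvr/O-jogo-Gemas | bibliotecaIsraelOliveira.py | validar_vertical
-- ===== SOURCE A (Python) =====
-- def validar_vertical(m, linhas, colunas): ### FUNÇÃO QUE VALIDA AS COLUNAS DA MATRIZ
--     valido = False
--     for c in range(colunas):
--         contador = 1
--         for l in range(linhas - 1):
--             if m[l][c].lower() == m[l+1][c].lower():
--                 contador +=1
--             else:
--                 contador = 1
--             if contador >= 3:
--                 valido = True
--
--     return valido
-- ===== SOURCE B (Python) =====
-- def validar_vertical(m, linhas, colunas):
--     return any(
--         m[l][c].lower() == m[l + 1][c].lower() == m[l + 2][c].lower()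
--         for c in range(colunas)
--         for l in range(linhas - 2)
--     )
-- ===== Notes on version B (the rewrite author's own statement) =====
-- stated objective: idiomatic
-- what changed: Replaces the per-column run-length counter (contador/valido accumulator state) with a stateless sliding three-cell window test expressed as a single any(...) comprehension.
import Mathlib
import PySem

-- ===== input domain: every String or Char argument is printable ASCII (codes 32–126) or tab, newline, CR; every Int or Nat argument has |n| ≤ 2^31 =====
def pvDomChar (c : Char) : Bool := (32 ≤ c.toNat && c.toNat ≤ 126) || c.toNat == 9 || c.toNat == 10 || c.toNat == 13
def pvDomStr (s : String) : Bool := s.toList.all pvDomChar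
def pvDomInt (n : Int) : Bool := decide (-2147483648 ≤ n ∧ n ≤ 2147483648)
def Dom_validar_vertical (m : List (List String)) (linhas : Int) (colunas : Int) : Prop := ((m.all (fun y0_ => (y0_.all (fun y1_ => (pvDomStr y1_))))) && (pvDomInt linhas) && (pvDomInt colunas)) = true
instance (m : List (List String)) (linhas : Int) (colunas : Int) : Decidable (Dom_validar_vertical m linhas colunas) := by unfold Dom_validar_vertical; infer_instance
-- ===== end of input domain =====

-- ===== PORT A =====
-- B changes only the scan strategy (window test instead of run counter): same cells, same result.
-- pvCell m l c = m[l][c].lower() (default "" outside range; Pre_ keeps every access in range)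
def pvCell (m : List (List String)) (l c : Int) : String :=
  PySem.Str.lower (PySem.List.pyGetD (PySem.List.pyGetD m l []) c "")

def validar_vertical (m : List (List String)) (linhas : Int) (colunas : Int) : Bool :=
  (PySem.List.pyRange 0 colunas 1).foldl
    (fun valido c =>
      ((PySem.List.pyRange 0 (linhas - 1) 1).foldl
        (fun (s : Int × Bool) l =>
          let contador : Int := if pvCell m l c == pvCell m (l + 1) c then s.1 + 1 else 1
          (contador, if 3 ≤ contador then true else s.2))
        (1, valido)).2)
    false

-- ===== PORT B =====
def validar_vertical_alt (m : List (List String)) (linhas : Int) (colunas : Int) : Bool :=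
  (PySem.List.pyRange 0 colunas 1).any (fun c =>
    (PySem.List.pyRange 0 (linhas - 2) 1).any (fun l =>
      (pvCell m l c == pvCell m (l + 1) c) && (pvCell m (l + 1) c == pvCell m (l + 2) c)))

-- ===== PRECONDITION & SPEC =====
-- Pre_ excludes exactly the inputs on which Python A raises IndexError: whenever the loops
-- access any cell (colunas > 0 and linhas > 1), rows 0..linhas-1 and columns 0..colunas-1 must exist.
def Pre_validar_vertical (m : List (List String)) (linhas : Int) (colunas : Int) : Prop :=
  (0 < colunas ∧ 1 < linhas) →
    (linhas ≤ (m.length : Int) ∧ ∀ row ∈ m.take linhas.toNat, colunas ≤ (row.length : Int))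
instance (m : List (List String)) (linhas : Int) (colunas : Int) : Decidable (Pre_validar_vertical m linhas colunas) := by unfold Pre_validar_vertical; infer_instance

def pvWitness_validar_vertical : List (List String) × Int × Int := ([["a"], ["A"], ["a"]], 3, 1)

def Spec_validar_vertical (m : List (List String)) (linhas : Int) (colunas : Int) (out : Bool) : Prop := out = validar_vertical_alt m linhas colunas
instance (m : List (List String)) (linhas : Int) (colunas : Int) (out : Bool) : Decidable (Spec_validar_vertical m linhas colunas out) := by unfold Spec_validar_vertical; infer_instance

-- ===== CLAIM (what is proved, stated in full; the proofs are below) =====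
def Claim_equal_validar_vertical : Prop := ∀ (m : List (List String)) (linhas : Int) (colunas : Int), Dom_validar_vertical m linhas colunas → Pre_validar_vertical m linhas colunas → Spec_validar_vertical m linhas colunas (validar_vertical m linhas colunas)

-- ===== LEMMAS AND PROOFS =====

-- run-length detector: what A's inner loop computes, over the list of adjacency booleans
def pvDetect : Int → List Bool → Bool
  | _, [] => false
  | cnt, b :: bs => (b && decide (3 ≤ cnt + 1)) || pvDetect (if b then cnt + 1 else 1) bs

-- sliding window: two adjacent trues
def pvAdj : List Bool → Bool
  | [] => false
  | [_] => false
  | a :: b :: bs => (a && b) || pvAdj (b :: bs)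

theorem pvFoldl_detect (bs : List Bool) : ∀ (cnt : Int) (v : Bool),
    (bs.foldl (fun (s : Int × Bool) b =>
        let c : Int := if b then s.1 + 1 else 1
        (c, if 3 ≤ c then true else s.2)) (cnt, v)).2
      = (v || pvDetect cnt bs) := by
  induction bs with
  | nil => intro cnt v; simp [pvDetect]
  | cons b bs ih =>
    intro cnt v
    cases b <;>
      simp only [List.foldl_cons, pvDetect, ih, Bool.false_and, Bool.true_and,
        Bool.false_or, if_true] <;>
      by_cases h : (3:Int) ≤ cnt + 1 <;>
      simp [h]

theorem pvDetect_adj (bs : List Bool) :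
    pvDetect 1 bs = pvAdj bs ∧ ∀ c : Int, 2 ≤ c → pvDetect c bs = (bs.head?.getD false || pvAdj bs) := by
  induction bs with
  | nil => exact ⟨rfl, fun c _ => rfl⟩
  | cons b bs ih =>
    obtain ⟨ih1, ih2⟩ := ih
    have hadj : ∀ (b : Bool), pvAdj (b :: bs) = ((b && bs.head?.getD false) || pvAdj bs) := by
      intro b; cases bs <;> simp [pvAdj]
    constructor
    · cases b
      · simp [pvDetect, ih1, hadj]
      · have h2 := ih2 2 (by omega)
        simp [pvDetect, h2, hadj]
    · intro c hc
      cases b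
      · simp [pvDetect, ih1, hadj]
      · simp [pvDetect, hadj, decide_eq_true (show (3:Int) ≤ c + 1 by omega)]

theorem pvAdj_range (e : Int → Bool) : ∀ (n : Nat) (a b : Int), (b - a).toNat = n →
    pvAdj ((PySem.List.pyRange a b 1).map e)
      = (PySem.List.pyRange a (b - 1) 1).any (fun l => e l && e (l + 1)) := by
  intro n
  induction n with
  | zero =>
    intro a b h
    have hba : b ≤ a := by omega
    rw [PySem.List.pyRange_one_eq_nil hba, PySem.List.pyRange_one_eq_nil (by omega)]
    simp [pvAdj]
  | succ k ih =>
    intro a b h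
    have hab : a < b := by omega
    rw [PySem.List.pyRange_one_cons hab]
    by_cases h2 : a + 1 < b
    · rw [PySem.List.pyRange_one_cons h2]
      have ihr := ih (a + 1) b (by omega)
      rw [PySem.List.pyRange_one_cons h2] at ihr
      rw [PySem.List.pyRange_one_cons (by omega : a < b - 1)]
      simp only [List.map_cons, pvAdj, List.any_cons] at ihr ⊢
      rw [ihr]
    · have hb1 : b = a + 1 := by omega
      subst hb1
      rw [PySem.List.pyRange_one_eq_nil (by omega : a + 1 ≤ a + 1),
        PySem.List.pyRange_one_eq_nil (by omega : a + 1 - 1 ≤ a)]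
      simp [pvAdj]

theorem pvFoldl_or_any {α : Type} (f : Bool → α → Bool) (g : α → Bool)
    (h : ∀ v c, f v c = (v || g c)) : ∀ (l : List α) (v : Bool), l.foldl f v = (v || l.any g) := by
  intro l
  induction l with
  | nil => intro v; simp
  | cons c l ih => intro v; simp [h, ih, Bool.or_assoc]

-- ===== VERDICT (by name: the statement is the Claim_ definition above) =====
theorem validar_vertical_spec : Claim_equal_validar_vertical := by
  intro m linhas colunas _ _
  unfold Spec_validar_vertical validar_vertical validar_vertical_alt
  rw [pvFoldl_or_any
    (g := fun c => (PySem.List.pyRange 0 (linhas - 2) 1).any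
      (fun l => (pvCell m l c == pvCell m (l + 1) c) && (pvCell m (l + 1) c == pvCell m (l + 2) c)))]
  · simp
  · intro v c
    have hmap : (PySem.List.pyRange 0 (linhas - 1) 1).foldl
        (fun (s : Int × Bool) l =>
          let contador : Int := if pvCell m l c == pvCell m (l + 1) c then s.1 + 1 else 1
          (contador, if 3 ≤ contador then true else s.2)) (1, v)
        = ((PySem.List.pyRange 0 (linhas - 1) 1).map
            (fun l => pvCell m l c == pvCell m (l + 1) c)).foldl
            (fun (s : Int × Bool) b =>
              let cn : Int := if b then s.1 + 1 else 1
              (cn, if 3 ≤ cn then true else s.2)) (1, v) := by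
      rw [List.foldl_map]
    rw [hmap, pvFoldl_detect, (pvDetect_adj _).1,
      pvAdj_range (fun l => pvCell m l c == pvCell m (l + 1) c) (linhas - 1 - 0).toNat 0 (linhas - 1) rfl]
    have h1 : linhas - 1 - 1 = linhas - 2 := by ring
    have h2 : ∀ l : Int, l + 1 + 1 = l + 2 := fun l => by ring
    simp only [h1, h2]
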